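-- pv_equiv track=rewrite | github.com/pjparadox/AudioBookChampion | dialogue_reassignment_gui.py | fallback_speaker
-- ===== SOURCE A (Python) =====
-- known_characters = {
--     "George": "male",
--     "Lennie": "male",
--     "Curley's Wife": "female",
--     "Candy": "male",
--     "Crooks": "male",
--     "Slim": "male",
--     "Curley": "male",
--     "Carlson": "male",
--     "Boss": "male",
--     "The Boss": "male"
-- }
--
-- def fallback_speaker(dialogue_text, prev_speaker):
--     """
--     Keyword-based fallback speaker attribution.
--
--     Args:
--         dialogue_text (str): Dialogue text.
--         prev_speaker (str): Previous speaker.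
--
--     Returns:
--         str: Guessed speaker.
--     """
--     found = []
--     lower_text = dialogue_text.lower()
--     for name, gender in known_characters.items():
--         if name.lower() in lower_text:
--             found.append((name, gender))
--     if len(found) == 1:
--         return f"{found[0][0]} {found[0][1]}"
--     elif prev_speaker:
--         for name, gender in known_characters.items():
--             if name.lower() in lower_text and name.lower() not in prev_speaker.lower():
--                 return f"{name} {gender}"
--     return "Unnamed1 unknown"
-- ===== SOURCE B (Python) =====
-- known_characters = {
--     "George": "male",
--     "Lennie": "male",
--     "Curley's Wife": "female",
--     "Candy": "male",
--     "Crooks": "male",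
--     "Slim": "male",
--     "Curley": "male",
--     "Carlson": "male",
--     "Boss": "male",
--     "The Boss": "male"
-- }
--
-- def fallback_speaker(dialogue_text, prev_speaker):
--     """Single pass: track match count, first match, and first match absent from prev."""
--     lower_text = dialogue_text.lower()
--     lower_prev = prev_speaker.lower()
--     count = 0
--     first = None
--     fresh = None
--     for name, gender in known_characters.items():
--         lname = name.lower()
--         if lname in lower_text:
--             count += 1
--             if first is None:
--                 first = (name, gender)
--             if fresh is None and lname not in lower_prev:
--                 fresh = (name, gender)
--     if count == 1:
--         return f"{first[0]} {first[1]}"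
--     if prev_speaker and fresh is not None:
--         return f"{fresh[0]} {fresh[1]}"
--     return "Unnamed1 unknown"
-- ===== Notes on version B (the rewrite author's own statement) =====
-- stated objective: alternative
-- what changed: B makes one pass over the dict maintaining three accumulators (match count, first match, first match absent from prev_speaker) and never builds the match list or re-scans the dict, whereas A builds a found list and re-scans the whole dict in the ambiguous case.
import Mathlib
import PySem

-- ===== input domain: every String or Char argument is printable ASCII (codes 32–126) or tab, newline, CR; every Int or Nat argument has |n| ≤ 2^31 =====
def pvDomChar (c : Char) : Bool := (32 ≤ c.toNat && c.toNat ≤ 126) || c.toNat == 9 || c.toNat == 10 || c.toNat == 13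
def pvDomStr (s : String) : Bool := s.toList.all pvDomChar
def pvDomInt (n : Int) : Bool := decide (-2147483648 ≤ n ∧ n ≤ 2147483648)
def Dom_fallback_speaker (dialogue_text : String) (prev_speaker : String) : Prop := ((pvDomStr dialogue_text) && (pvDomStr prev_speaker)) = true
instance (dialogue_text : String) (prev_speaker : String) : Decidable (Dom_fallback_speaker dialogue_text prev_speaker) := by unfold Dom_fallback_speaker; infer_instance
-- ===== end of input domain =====

-- B replaces A's match list and second full dict scan by a single pass keeping three
-- accumulators (match count, first match, first match absent from prev) (objective: alternative).

-- the module-level dict known_characters, in insertion order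
def knownCharacters : List (String × String) :=
  [("George", "male"), ("Lennie", "male"), ("Curley's Wife", "female"),
   ("Candy", "male"), ("Crooks", "male"), ("Slim", "male"), ("Curley", "male"),
   ("Carlson", "male"), ("Boss", "male"), ("The Boss", "male")]

-- ===== PORT A =====
-- A's second loop: first (name, gender) of the dict with name.lower() in lower_text and not in prev-lower; else default
def fallbackAScan (lowerText lowerPrev : String) : List (String × String) → String
  | [] => "Unnamed1 unknown"
  | (n, g) :: rest =>
      if PySem.Str.isIn (PySem.Str.lower n) lowerText
          && !(PySem.Str.isIn (PySem.Str.lower n) lowerPrev) then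
        n ++ " " ++ g
      else fallbackAScan lowerText lowerPrev rest

def fallback_speaker (dialogue_text : String) (prev_speaker : String) : String :=
  let lowerText := PySem.Str.lower dialogue_text
  let found := knownCharacters.foldl
    (fun acc p => if PySem.Str.isIn (PySem.Str.lower p.1) lowerText then acc ++ [p] else acc)
    ([] : List (String × String))
  if found.length = 1 then (found.headD ("", "")).1 ++ " " ++ (found.headD ("", "")).2
  else if prev_speaker ≠ "" then
    fallbackAScan lowerText (PySem.Str.lower prev_speaker) knownCharacters
  else "Unnamed1 unknown"

-- ===== PORT B =====
-- B's loop body: update (count, first match, first match whose lowered name is not in prev)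
def fallbackBStep (lowerText lowerPrev : String)
    (s : Nat × Option (String × String) × Option (String × String)) (p : String × String) :
    Nat × Option (String × String) × Option (String × String) :=
  if PySem.Str.isIn (PySem.Str.lower p.1) lowerText then
    (s.1 + 1,
     (match s.2.1 with | some f => some f | none => some p),
     (match s.2.2 with
      | some f => some f
      | none => if PySem.Str.isIn (PySem.Str.lower p.1) lowerPrev then none else some p))
  else s

def fallback_speaker_alt (dialogue_text : String) (prev_speaker : String) : String :=
  let lowerText := PySem.Str.lower dialogue_text
  let lowerPrev := PySem.Str.lower prev_speaker
  let s := knownCharacters.foldl (fallbackBStep lowerText lowerPrev)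
    ((0 : Nat), (none : Option (String × String)), (none : Option (String × String)))
  if s.1 = 1 then
    match s.2.1 with
    | some (n, g) => n ++ " " ++ g
    | none => "Unnamed1 unknown"   -- unreachable: count = 1 forces a first match
  else if prev_speaker ≠ "" then
    match s.2.2 with
    | some (n, g) => n ++ " " ++ g
    | none => "Unnamed1 unknown"
  else "Unnamed1 unknown"

-- ===== PRECONDITION & SPEC =====
def Spec_fallback_speaker (dialogue_text : String) (prev_speaker : String) (out : String) : Prop := out = fallback_speaker_alt dialogue_text prev_speaker
instance (dialogue_text : String) (prev_speaker : String) (out : String) : Decidable (Spec_fallback_speaker dialogue_text prev_speaker out) := by unfold Spec_fallback_speaker; infer_instance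

-- ===== CLAIM (what is proved, stated in full; the proofs are below) =====
def Claim_equal_fallback_speaker : Prop := ∀ (dialogue_text : String) (prev_speaker : String), Dom_fallback_speaker dialogue_text prev_speaker → Spec_fallback_speaker dialogue_text prev_speaker (fallback_speaker dialogue_text prev_speaker)

-- ===== LEMMAS AND PROOFS =====

-- B's fold computes: the match count, the first match, and the first match not in prev
theorem fallbackB_fold_spec (lowerText lowerPrev : String) (xs : List (String × String))
    (s : Nat × Option (String × String) × Option (String × String)) :
    xs.foldl (fallbackBStep lowerText lowerPrev) s =
      (s.1 + (xs.filter (fun p => PySem.Str.isIn (PySem.Str.lower p.1) lowerText)).length,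
       (match s.2.1 with
        | some f => some f
        | none => (xs.filter (fun p => PySem.Str.isIn (PySem.Str.lower p.1) lowerText)).head?),
       (match s.2.2 with
        | some f => some f
        | none => (xs.filter (fun p => PySem.Str.isIn (PySem.Str.lower p.1) lowerText
                      && !(PySem.Str.isIn (PySem.Str.lower p.1) lowerPrev))).head?)) := by
  induction xs generalizing s with
  | nil =>
      obtain ⟨c, f1, f2⟩ := s
      cases f1 <;> cases f2 <;> rfl
  | cons hd tl ih =>
      rw [List.foldl_cons, ih]
      by_cases hq : PySem.Str.isIn (PySem.Str.lower hd.1) lowerText = true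
      · by_cases hr : PySem.Str.isIn (PySem.Str.lower hd.1) lowerPrev = true
        · simp only [fallbackBStep, hq, List.filter_cons, hr, Bool.not_true, Bool.and_false,
            Bool.false_eq_true, if_false, if_true]
          refine Prod.ext ?_ (Prod.ext ?_ ?_) <;>
            cases h1 : s.2.1 <;> cases h2 : s.2.2 <;> simp <;> omega
        · have hr' : PySem.Str.isIn (PySem.Str.lower hd.1) lowerPrev = false := by simpa using hr
          simp only [fallbackBStep, hq, if_true, List.filter_cons, hr', Bool.not_false,
            Bool.and_true, Bool.false_eq_true, if_false]
          refine Prod.ext ?_ (Prod.ext ?_ ?_) <;>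
            cases h1 : s.2.1 <;> cases h2 : s.2.2 <;> simp <;> omega
      · have hq' : PySem.Str.isIn (PySem.Str.lower hd.1) lowerText = false := by simpa using hq
        simp only [fallbackBStep, hq', Bool.false_eq_true, if_false, List.filter_cons,
          Bool.false_and]

-- A's first loop builds exactly the filtered list
theorem fallbackA_found_eq (lowerText : String) (xs : List (String × String)) :
    xs.foldl (fun acc p => if PySem.Str.isIn (PySem.Str.lower p.1) lowerText then acc ++ [p] else acc)
      ([] : List (String × String))
      = xs.filter (fun p => PySem.Str.isIn (PySem.Str.lower p.1) lowerText) := by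
  induction xs using List.reverseRecOn with
  | nil => rfl
  | append_singleton tl hd ih =>
      rw [List.foldl_append, List.foldl_cons, List.foldl_nil, ih, List.filter_append]
      by_cases h : PySem.Str.isIn (PySem.Str.lower hd.1) lowerText = true
      · have h' : PySem.Chars.isIn (PySem.Chars.lower hd.1.toList) lowerText.toList = true := by simpa using h
        simp [h']
      · have h' : PySem.Chars.isIn (PySem.Chars.lower hd.1.toList) lowerText.toList = false := by
          simpa using h
        simp [h']

-- A's second scan returns the head of the doubly-filtered list (or the default)
theorem fallbackAScan_eq_head (lowerText lowerPrev : String) (xs : List (String × String)) :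
    fallbackAScan lowerText lowerPrev xs =
      match (xs.filter (fun p => PySem.Str.isIn (PySem.Str.lower p.1) lowerText
                && !(PySem.Str.isIn (PySem.Str.lower p.1) lowerPrev))).head? with
      | some (n, g) => n ++ " " ++ g
      | none => "Unnamed1 unknown" := by
  induction xs with
  | nil => rfl
  | cons hd tl ih =>
      obtain ⟨n, g⟩ := hd
      by_cases h : (PySem.Str.isIn (PySem.Str.lower n) lowerText
          && !(PySem.Str.isIn (PySem.Str.lower n) lowerPrev)) = true
      · rw [fallbackAScan, if_pos h]
        simp only [List.filter_cons, h, if_true, List.head?_cons]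
      · have h' : (PySem.Str.isIn (PySem.Str.lower n) lowerText
            && !(PySem.Str.isIn (PySem.Str.lower n) lowerPrev)) = false := by simpa using h
        rw [fallbackAScan, if_neg h, ih]
        simp only [List.filter_cons, h', Bool.false_eq_true, if_false]

-- ===== VERDICT (by name: the statement is the Claim_ definition above) =====
theorem fallback_speaker_spec : Claim_equal_fallback_speaker := by
  intro dt ps _
  show fallback_speaker dt ps = fallback_speaker_alt dt ps
  unfold fallback_speaker fallback_speaker_alt
  simp only [fallbackB_fold_spec, fallbackA_found_eq, fallbackAScan_eq_head, Nat.zero_add]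
  set fl := knownCharacters.filter
    (fun p => PySem.Str.isIn (PySem.Str.lower p.1) (PySem.Str.lower dt)) with hfl
  by_cases h1 : fl.length = 1
  · rw [if_pos h1, if_pos h1]
    match hh : fl with
    | [] => simp at h1
    | (n, g) :: t => rfl
  · rw [if_neg h1, if_neg h1]
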